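-- pv_equiv track=rewrite | github.com/wjddn1029/AlgorithmStudy | 연습_J/practice5_2.py | printData
-- ===== SOURCE A (Python) =====
-- def printData(data, time, answer):
--     compare = list(filter(lambda x: x[1] <= time, data))
--     if not compare:
--         time += 1
--         return time
--     compare.sort(key=lambda x: x[2])
--     if compare:
--         for i in compare:
--             time += i[2]
--             answer.append(i[0])
--             index = [data.index(n) for n in data if n == i]
--             data.pop(index[0])
--             break
--
--     return time
-- ===== SOURCE B (Python) =====
-- def printData(data, time, answer):
--     # One linear scan tracking the best (earliest, min-third-field) available item.
--     best = None
--     for item in data: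
--         if item[1] <= time and (best is None or item[2] < best[2]):
--             best = item
--     if best is None:
--         return time + 1
--     answer.append(best[0])
--     data.remove(best)
--     return time + best[2]
-- ===== Notes on version B (the rewrite author's own statement) =====
-- stated objective: simpler
-- what changed: Replaces filter + stable sort + index-comprehension removal with a single linear scan that keeps the earliest minimum-cost available item, then one remove of the first equal element.
import Mathlib
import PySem

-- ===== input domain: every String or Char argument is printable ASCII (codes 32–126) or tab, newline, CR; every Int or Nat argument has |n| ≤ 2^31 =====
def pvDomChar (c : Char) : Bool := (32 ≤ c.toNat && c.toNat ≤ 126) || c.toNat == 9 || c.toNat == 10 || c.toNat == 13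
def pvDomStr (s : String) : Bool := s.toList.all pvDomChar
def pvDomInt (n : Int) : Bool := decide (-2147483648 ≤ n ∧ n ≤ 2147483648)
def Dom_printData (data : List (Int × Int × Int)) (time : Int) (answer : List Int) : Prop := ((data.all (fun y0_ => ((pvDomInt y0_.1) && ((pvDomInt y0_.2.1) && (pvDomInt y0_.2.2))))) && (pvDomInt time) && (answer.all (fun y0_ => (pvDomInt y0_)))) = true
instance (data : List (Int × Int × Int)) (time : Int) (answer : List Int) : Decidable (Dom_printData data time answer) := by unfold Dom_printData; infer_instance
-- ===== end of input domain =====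

-- B replaces filter+stable-sort+index-comprehension removal by one linear scan for the
-- earliest minimum-cost available item.  Equivalence is about the RETURN value only:
-- both Pythons also append to `answer` and remove the chosen item from `data` in place
-- (B performs the same mutations; the ports mirror them as unused lets).

-- ===== PORT A =====
def printData (data : List (Int × Int × Int)) (time : Int) (answer : List Int) : Int :=
  let compare := data.filter (fun x => decide (x.2.1 ≤ time))
  if compare = [] then
    time + 1
  else
    match PySem.List.sorted compare (fun x => x.2.2) with
    | [] => time
    | i :: _ =>
      let time := time + i.2.2
      let _answer := answer ++ [i.1]
      let index := (data.filter (fun n => decide (n = i))).map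
        (fun n => ((PySem.List.index? data n).getD 0 : Int))
      let _data := PySem.List.pop? data ((PySem.List.pyGet? index 0).getD 0)
      time

-- ===== PORT B =====
def printData_alt (data : List (Int × Int × Int)) (time : Int) (answer : List Int) : Int :=
  let best := data.foldl
    (fun (b : Option (Int × Int × Int)) item =>
      match b with
      | none => if item.2.1 ≤ time then some item else none
      | some m => if item.2.1 ≤ time ∧ item.2.2 < m.2.2 then some item else some m)
    none
  match best with
  | none => time + 1
  | some chosen =>
    let _answer := answer ++ [chosen.1]
    let _data := PySem.List.remove? data chosen
    time + chosen.2.2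

-- ===== PRECONDITION & SPEC =====
def Spec_printData (data : List (Int × Int × Int)) (time : Int) (answer : List Int) (out : Int) : Prop := out = printData_alt data time answer
instance (data : List (Int × Int × Int)) (time : Int) (answer : List Int) (out : Int) : Decidable (Spec_printData data time answer out) := by unfold Spec_printData; infer_instance

-- ===== CLAIM (what is proved, stated in full; the proofs are below) =====
def Claim_equal_printData : Prop := ∀ (data : List (Int × Int × Int)) (time : Int) (answer : List Int), Dom_printData data time answer → Spec_printData data time answer (printData data time answer)

-- ===== LEMMAS AND PROOFS =====

-- B's fold only changes its state on available items: it equals a pure min-scan over the filtered list.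
theorem foldB_filter (time : Int) (data : List (Int × Int × Int)) (b : Option (Int × Int × Int)) :
    data.foldl
      (fun (b : Option (Int × Int × Int)) item =>
        match b with
        | none => if item.2.1 ≤ time then some item else none
        | some m => if item.2.1 ≤ time ∧ item.2.2 < m.2.2 then some item else some m) b
    = (data.filter (fun x => decide (x.2.1 ≤ time))).foldl
      (fun (b : Option (Int × Int × Int)) item =>
        match b with
        | none => some item
        | some m => if item.2.2 < m.2.2 then some item else some m) b := by
  induction data generalizing b with
  | nil => rfl
  | cons x xs ih =>
    by_cases hx : x.2.1 ≤ time
    · simp only [List.foldl_cons, List.filter_cons, hx, decide_true, if_true, ih]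
      congr 1
      cases b with
      | none => simp [hx]
      | some m => by_cases h2 : x.2.2 < m.2.2 <;> simp [h2]
    · cases b with
      | none => simp [hx, ih]
      | some m => simp [hx, ih]

-- Once the state is `some m`, the filtered fold is a running minimum on the third component.
theorem foldB_third (l : List (Int × Int × Int)) (m : Int × Int × Int) :
    l.foldl
      (fun (b : Option (Int × Int × Int)) item =>
        match b with
        | none => some item
        | some m => if item.2.2 < m.2.2 then some item else some m) (some m)
    = some (l.foldl (fun acc item => if item.2.2 < acc.2.2 then item else acc) m) := by
  induction l generalizing m with
  | nil => rfl
  | cons x xs ih =>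
    by_cases h : x.2.2 < m.2.2 <;> simp [h, ih]

-- The running minimum is one of the candidates and its third component is minimal among them.
theorem runMin_spec (l : List (Int × Int × Int)) (m : Int × Int × Int) :
    (l.foldl (fun acc item => if item.2.2 < acc.2.2 then item else acc) m) ∈ m :: l ∧
    ∀ y ∈ m :: l, (l.foldl (fun acc item => if item.2.2 < acc.2.2 then item else acc) m).2.2 ≤ y.2.2 := by
  induction l generalizing m with
  | nil => simp
  | cons x xs ih =>
    by_cases h : x.2.2 < m.2.2
    · rw [List.foldl_cons, if_pos h]
      obtain ⟨h1, h2⟩ := ih x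
      refine ⟨?_, ?_⟩
      · rcases List.mem_cons.mp h1 with h1 | h1
        · simp [h1]
        · simp [List.mem_cons, h1]
      · intro y hy
        rcases List.mem_cons.mp hy with rfl | hy
        · exact le_of_lt (lt_of_le_of_lt (h2 x (by simp)) h)
        · exact h2 y hy
    · rw [List.foldl_cons, if_neg h]
      obtain ⟨h1, h2⟩ := ih m
      refine ⟨?_, ?_⟩
      · rcases List.mem_cons.mp h1 with h1 | h1
        · simp [h1]
        · simp [List.mem_cons, h1]
      · intro y hy
        rcases List.mem_cons.mp hy with rfl | hy
        · exact h2 _ (by simp)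
        · rcases List.mem_cons.mp hy with rfl | hy
          · exact le_trans (h2 _ (by simp)) (le_of_not_gt h)
          · exact h2 _ (List.mem_cons_of_mem _ hy)

-- ===== VERDICT (by name: the statement is the Claim_ definition above) =====
theorem printData_spec : Claim_equal_printData := by
  intro data time answer _
  unfold Spec_printData printData printData_alt
  rw [foldB_filter]
  by_cases hc : data.filter (fun x => decide (x.2.1 ≤ time)) = []
  · simp [hc]
  · rw [if_neg hc]
    obtain ⟨i, t, hsort⟩ : ∃ i t,
        PySem.List.sorted (data.filter (fun x => decide (x.2.1 ≤ time))) (fun x => x.2.2) = i :: t := by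
      rcases hs : PySem.List.sorted (data.filter (fun x => decide (x.2.1 ≤ time))) (fun x => x.2.2)
        with _ | ⟨i, t⟩
      · exact absurd ((PySem.List.sorted_eq_nil_iff _ _ _).mp hs) hc
      · exact ⟨i, t, hs⟩
    rw [hsort]
    have hi_min : ∀ y ∈ data.filter (fun x => decide (x.2.1 ≤ time)), i.2.2 ≤ y.2.2 :=
      PySem.List.key_head_sorted_le _ _ hsort
    have hi_mem : i ∈ data.filter (fun x => decide (x.2.1 ≤ time)) := by
      have hp := PySem.List.sorted_perm (data.filter (fun x => decide (x.2.1 ≤ time)))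
        (fun x => x.2.2) false
      rw [hsort] at hp
      exact hp.mem_iff.mp (by simp)
    obtain ⟨c, cs, hccs⟩ : ∃ c cs, data.filter (fun x => decide (x.2.1 ≤ time)) = c :: cs := by
      rcases hd : data.filter (fun x => decide (x.2.1 ≤ time)) with _ | ⟨c, cs⟩
      · exact absurd hd hc
      · exact ⟨c, cs, hd⟩
    rw [hccs] at hi_min hi_mem ⊢
    rw [List.foldl_cons]
    simp only []
    rw [foldB_third]
    obtain ⟨hmem, hmin⟩ := runMin_spec cs c
    have h1 : i.2.2 ≤ (cs.foldl (fun acc item => if item.2.2 < acc.2.2 then item else acc) c).2.2 :=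
      hi_min _ hmem
    have h2 : (cs.foldl (fun acc item => if item.2.2 < acc.2.2 then item else acc) c).2.2 ≤ i.2.2 :=
      hmin i hi_mem
    show time + i.2.2 = time + (cs.foldl (fun acc item => if item.2.2 < acc.2.2 then item else acc) c).2.2
    omega
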